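-- pv_equiv track=rewrite | github.com/sdy623/ZhengFang-icsExporter | zfnew/api/get_info.py | calWeeks
-- ===== SOURCE A (Python) =====
-- def calWeeks(args):
--     """返回课程所含周列表"""
--     if len(args) == 1:
--         num = int(args[0])
--         firstlist = [num]
--         return firstlist
--     elif len(args) == 2:
--         k1 = int(args[0])
--         k2 = int(args[1])
--         r = []
--         for n in range(k1, k2 + 1):
--             r.append(n)
--         return r
--     elif len(args) == 3:
--         k12 = int(args[0])
--         k22 = int(args[1])
--         r2 = []
--         for n2 in range(k12, k22 + 1):
--             r2.append(n2)
--         r2.append(int(args[2]))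
--         return r2
--     elif len(args) == 4:
--         num1 = int(args[0])
--         num2 = int(args[1])
--         num3 = int(args[2])
--         num4 = int(args[3])
--         clist = []
--         for i in range(num1, num2 + 1):
--             clist.append(i)
--         for j in range(num3, num4 + 1):
--             clist.append(j)
--         return clist
--     else:
--         return [1, 2, 3, 4, 5, 6, 7, 8, 9, 10, 11, 12, 13, 14, 15, 16, 17]
-- ===== SOURCE B (Python) =====
-- def calWeeks(args):
--     """返回课程所含周列表"""
--     if len(args) not in (1, 2, 3, 4):
--         return list(range(1, 18))
--     weeks = []
--     for i in range(0, len(args) - 1, 2):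
--         weeks.extend(range(int(args[i]), int(args[i + 1]) + 1))
--     if len(args) % 2 == 1:
--         weeks.append(int(args[-1]))
--     return weeks
-- ===== Notes on version B (the rewrite author's own statement) =====
-- stated objective: simpler
-- what changed: Replaces the four-branch arity ladder (separate per-length duplicated range loops) with one uniform pairing loop: consecutive argument pairs are expanded to inclusive ranges and an odd leftover argument is appended; lengths outside 1..4 return the literal default weeks.
import Mathlib
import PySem

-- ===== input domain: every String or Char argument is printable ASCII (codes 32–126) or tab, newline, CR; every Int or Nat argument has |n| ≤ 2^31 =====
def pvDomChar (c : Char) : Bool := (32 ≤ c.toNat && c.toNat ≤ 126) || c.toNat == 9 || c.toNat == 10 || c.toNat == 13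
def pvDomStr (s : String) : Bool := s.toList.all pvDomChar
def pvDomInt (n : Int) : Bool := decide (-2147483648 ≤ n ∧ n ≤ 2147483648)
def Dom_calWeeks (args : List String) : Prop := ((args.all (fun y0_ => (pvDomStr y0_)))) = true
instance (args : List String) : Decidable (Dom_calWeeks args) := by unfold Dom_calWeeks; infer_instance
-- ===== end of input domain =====

-- B replaces A's four-branch arity ladder by one uniform pairing loop (simpler decomposition, same cost).

-- int(s); Pre_calWeeks guarantees the parse succeeds wherever this is reached (Python raises ValueError otherwise)
def pyIntD (s : String) : Int := (PySem.Int.ofStr? s).getD 0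

-- ===== PORT A =====
def calWeeks (args : List String) : List Int :=
  if args.length = 1 then
    let num := pyIntD (PySem.List.pyGetD args 0 "")
    [num]
  else if args.length = 2 then
    let k1 := pyIntD (PySem.List.pyGetD args 0 "")
    let k2 := pyIntD (PySem.List.pyGetD args 1 "")
    (PySem.List.pyRange k1 (k2 + 1) 1).foldl (fun r n => r ++ [n]) []
  else if args.length = 3 then
    let k12 := pyIntD (PySem.List.pyGetD args 0 "")
    let k22 := pyIntD (PySem.List.pyGetD args 1 "")
    let r2 := (PySem.List.pyRange k12 (k22 + 1) 1).foldl (fun r n => r ++ [n]) []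
    r2 ++ [pyIntD (PySem.List.pyGetD args 2 "")]
  else if args.length = 4 then
    let num1 := pyIntD (PySem.List.pyGetD args 0 "")
    let num2 := pyIntD (PySem.List.pyGetD args 1 "")
    let num3 := pyIntD (PySem.List.pyGetD args 2 "")
    let num4 := pyIntD (PySem.List.pyGetD args 3 "")
    let clist := (PySem.List.pyRange num1 (num2 + 1) 1).foldl (fun r n => r ++ [n]) []
    (PySem.List.pyRange num3 (num4 + 1) 1).foldl (fun r n => r ++ [n]) clist
  else
    [1, 2, 3, 4, 5, 6, 7, 8, 9, 10, 11, 12, 13, 14, 15, 16, 17]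

-- ===== PORT B =====
def calWeeks_alt (args : List String) : List Int :=
  if ¬ (args.length = 1 ∨ args.length = 2 ∨ args.length = 3 ∨ args.length = 4) then
    PySem.List.pyRange 1 18 1
  else
    let weeks := (PySem.List.pyRange 0 ((args.length : Int) - 1) 2).foldl
      (fun w i =>
        w ++ PySem.List.pyRange (pyIntD (PySem.List.pyGetD args i ""))
              (pyIntD (PySem.List.pyGetD args (i + 1) "") + 1) 1) []
    if args.length % 2 = 1 then weeks ++ [pyIntD (PySem.List.pyGetD args (-1) "")]
    else weeks

-- ===== PRECONDITION & SPEC =====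
-- Pre_ excludes exactly the inputs where Python's int() raises ValueError (len 1..4 with a non-integer string).
def Pre_calWeeks (args : List String) : Prop :=
  (1 ≤ args.length ∧ args.length ≤ 4) → ∀ s ∈ args, (PySem.Int.ofStr? s).isSome
instance (args : List String) : Decidable (Pre_calWeeks args) := by unfold Pre_calWeeks; infer_instance
def pvWitness_calWeeks : List String := ["1", "3"]

def Spec_calWeeks (args : List String) (out : List Int) : Prop := out = calWeeks_alt args
instance (args : List String) (out : List Int) : Decidable (Spec_calWeeks args out) := by unfold Spec_calWeeks; infer_instance

-- ===== CLAIM (what is proved, stated in full; the proofs are below) =====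
def Claim_equal_calWeeks : Prop := ∀ (args : List String), Dom_calWeeks args → Pre_calWeeks args → Spec_calWeeks args (calWeeks args)

-- ===== LEMMAS AND PROOFS =====

theorem pv_flatten_map_singleton (l : List Int) : (List.map (fun x => [x]) l).flatten = l := by
  induction l with
  | nil => rfl
  | cons x xs ih => simp [List.map_cons, List.flatten_cons, ih]

-- ===== VERDICT (by name: the statement is the Claim_ definition above) =====
theorem calWeeks_spec : Claim_equal_calWeeks := by
  intro args _ _
  unfold Spec_calWeeks calWeeks calWeeks_alt
  match args with
  | [] => decide
  | [a] =>
      simp [PySem.List.pyGetD, PySem.List.pyGet?, PySem.List.pyIdx?,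
            show PySem.List.pyRange 0 0 2 = [] from by decide]
  | [a, b] =>
      simp [pv_flatten_map_singleton, PySem.List.pyGetD, PySem.List.pyGet?, PySem.List.pyIdx?,
            show PySem.List.pyRange 0 1 2 = [0] from by decide]
  | [a, b, c] =>
      simp [pv_flatten_map_singleton, PySem.List.pyGetD, PySem.List.pyGet?, PySem.List.pyIdx?,
            show PySem.List.pyRange 0 2 2 = [0] from by decide]
  | [a, b, c, d] =>
      simp [pv_flatten_map_singleton, PySem.List.pyGetD, PySem.List.pyGet?, PySem.List.pyIdx?,
            show PySem.List.pyRange 0 3 2 = [0, 2] from by decide]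
  | a :: b :: c :: d :: e :: rest =>
      simp [show PySem.List.pyRange 1 18 1 = [1,2,3,4,5,6,7,8,9,10,11,12,13,14,15,16,17] from by decide,
            List.length_cons]
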